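-- pv_equiv track=rewrite | github.com/UshanRJ/ceylon-guide_chatbot | backend/app/ml/model_trainer.py | _prepare_training_data
-- ===== SOURCE A (Python) =====
-- from typing import List, Dict, Tuple, Any, Optional, Union
--
-- def _prepare_training_data(training_data: List[Dict[str, Any]]) -> Tuple[List[str], List[str]]:
--     """Prepare training data for model training"""
--     X = []
--     y = []
--
--     for item in training_data:
--         if 'text' in item and 'intent' in item:
--             X.append(str(item['text']))
--             y.append(str(item['intent']))
--
--     return X, y
-- ===== SOURCE B (Python) =====
-- from typing import List, Dict, Tuple, Any
--
-- def _prepare_training_data(training_data: List[Dict[str, Any]]) -> Tuple[List[str], List[str]]: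
--     """Prepare training data for model training (divide and conquer)."""
--     n = len(training_data)
--     if n == 0:
--         return [], []
--     if n == 1:
--         item = training_data[0]
--         if 'text' in item and 'intent' in item:
--             return [str(item['text'])], [str(item['intent'])]
--         return [], []
--     mid = n // 2
--     lx, ly = _prepare_training_data(training_data[:mid])
--     rx, ry = _prepare_training_data(training_data[mid:])
--     return lx + rx, ly + ry
-- ===== Notes on version B (the rewrite author's own statement) =====
-- stated objective: alternative
-- what changed: Replaces A's single left-to-right loop appending to two parallel accumulator lists by a divide-and-conquer recursion: split the list in half, recurse on each half, and concatenate the two half-results.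
import Mathlib
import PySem

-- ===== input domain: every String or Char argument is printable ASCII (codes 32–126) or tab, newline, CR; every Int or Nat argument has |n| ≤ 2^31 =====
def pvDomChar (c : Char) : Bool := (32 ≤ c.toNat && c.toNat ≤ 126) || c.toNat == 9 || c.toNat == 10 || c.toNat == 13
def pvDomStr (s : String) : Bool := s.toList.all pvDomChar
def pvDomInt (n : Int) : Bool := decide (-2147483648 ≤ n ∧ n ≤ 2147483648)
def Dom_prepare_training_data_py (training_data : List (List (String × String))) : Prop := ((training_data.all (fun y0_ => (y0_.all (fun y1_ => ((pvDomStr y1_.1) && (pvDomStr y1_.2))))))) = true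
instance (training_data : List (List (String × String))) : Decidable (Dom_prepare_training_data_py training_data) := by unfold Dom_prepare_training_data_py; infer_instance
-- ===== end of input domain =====

-- B replaces A's single loop with two parallel accumulator lists by a divide-and-conquer recursion (split in half, recurse, concatenate); objective: alternative decomposition, same result.


-- ===== PORT A =====
-- A: one loop over training_data appending to two parallel lists X and y.
def prepare_training_data_py (training_data : List (List (String × String))) : List String × List String :=
  let init : List String × List String := ([], [])
  let r := training_data.foldl (fun (acc : List String × List String) item =>
    if (PySem.Dict.mk item).contains "text" && (PySem.Dict.mk item).contains "intent" then
      (acc.1 ++ [((PySem.Dict.mk item).get? "text").getD ""],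
       acc.2 ++ [((PySem.Dict.mk item).get? "intent").getD ""])
    else acc) init
  r

-- ===== PORT B =====
-- B: divide and conquer — split the list at its midpoint, recurse on the halves, concatenate.
-- Python's slices td[:mid] / td[mid:] with 0 ≤ mid ≤ len are exactly List.take / List.drop.
def prepare_training_data_py_alt (training_data : List (List (String × String))) : List String × List String :=
  if h0 : training_data.length = 0 then ([], [])
  else if h1 : training_data.length = 1 then
    match training_data with
    | item :: _ =>
      if (PySem.Dict.mk item).contains "text" && (PySem.Dict.mk item).contains "intent" then
        ([((PySem.Dict.mk item).get? "text").getD ""],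
         [((PySem.Dict.mk item).get? "intent").getD ""])
      else ([], [])
    | [] => ([], [])
  else
    let mid := training_data.length / 2
    let l := prepare_training_data_py_alt (training_data.take mid)
    let r := prepare_training_data_py_alt (training_data.drop mid)
    (l.1 ++ r.1, l.2 ++ r.2)
termination_by training_data.length
decreasing_by
  · simp only [List.length_take]; omega
  · simp only [List.length_drop]; omega

-- ===== PRECONDITION & SPEC =====
def Spec_prepare_training_data_py (training_data : List (List (String × String))) (out : List String × List String) : Prop := out = prepare_training_data_py_alt training_data
instance (training_data : List (List (String × String))) (out : List String × List String) : Decidable (Spec_prepare_training_data_py training_data out) := by unfold Spec_prepare_training_data_py; infer_instance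

-- ===== CLAIM (what is proved, stated in full; the proofs are below) =====
def Claim_equal_prepare_training_data_py : Prop := ∀ (training_data : List (List (String × String))), Dom_prepare_training_data_py training_data → Spec_prepare_training_data_py training_data (prepare_training_data_py training_data)

-- ===== LEMMAS AND PROOFS =====

-- Reference characterisation: the unzipped list of qualifying (text, intent) pairs.
def pvPairs (td : List (List (String × String))) : List (String × String) :=
  td.filterMap (fun item =>
    match (PySem.Dict.mk item).get? "text", (PySem.Dict.mk item).get? "intent" with
    | some t, some i => some (t, i)
    | _, _ => none)

def pvF (td : List (List (String × String))) : List String × List String :=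
  ((pvPairs td).map Prod.fst, (pvPairs td).map Prod.snd)

theorem contains_eq_isSome (l : List (String × String)) (k : String) :
    (PySem.Dict.mk l).contains k = ((PySem.Dict.mk l).get? k).isSome := by
  induction l with
  | nil => simp [PySem.Dict.contains, PySem.Dict.get?]
  | cons p rest ih =>
    rw [PySem.Dict.get?_mk_cons]
    by_cases h : (p.1 == k) = true
    · simp [PySem.Dict.contains, h]
    · simp only [Bool.not_eq_true] at h
      simp [PySem.Dict.contains, h, ← ih]

theorem pvF_append (a b : List (List (String × String))) :
    pvF (a ++ b) = ((pvF a).1 ++ (pvF b).1, (pvF a).2 ++ (pvF b).2) := by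
  simp [pvF, pvPairs, List.filterMap_append]

-- B computes the reference characterisation.
theorem alt_eq_pvF (td : List (List (String × String))) :
    prepare_training_data_py_alt td = pvF td := by
  fun_induction prepare_training_data_py_alt td
  case case1 h0 =>
    rw [List.length_eq_zero_iff.mp h0]; simp [pvF, pvPairs]
  case case2 hn0 hn1 hc hn0' hn1' =>
    rename_i item rest
    simp only [List.length_cons, Nat.add_eq_right, List.length_eq_zero_iff] at hn1
    subst hn1
    rw [contains_eq_isSome item "text", contains_eq_isSome item "intent"] at hc
    rcases ht : (PySem.Dict.mk item).get? "text" with _ | t <;>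
      rcases hi : (PySem.Dict.mk item).get? "intent" with _ | i <;>
        simp_all [pvF, pvPairs]
  case case3 hn0 hn1 hc hn0' hn1' =>
    rename_i item rest
    simp only [List.length_cons, Nat.add_eq_right, List.length_eq_zero_iff] at hn1
    subst hn1
    rw [contains_eq_isSome item "text", contains_eq_isSome item "intent"] at hc
    rcases ht : (PySem.Dict.mk item).get? "text" with _ | t <;>
      rcases hi : (PySem.Dict.mk item).get? "intent" with _ | i <;>
        simp_all [pvF, pvPairs]
  case case4 hn0 hn1 => simp at hn1
  case case5 =>
    rename_i td hn0 hn1 mid l r ih2 ih1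
    show ((prepare_training_data_py_alt (List.take mid td)).1 ++ (prepare_training_data_py_alt (List.drop mid td)).1,
          (prepare_training_data_py_alt (List.take mid td)).2 ++ (prepare_training_data_py_alt (List.drop mid td)).2) = pvF td
    conv_rhs => rw [show td = List.take mid td ++ List.drop mid td from (List.take_append_drop mid td).symm]
    rw [pvF_append, ih2, ih1]

-- Loop invariant for A's fold: it appends the unzipped qualifying pairs to the accumulator.
theorem foldl_prepA (td : List (List (String × String))) :
    ∀ (X y : List String),
      td.foldl (fun (acc : List String × List String) item =>
        if (PySem.Dict.mk item).contains "text" && (PySem.Dict.mk item).contains "intent" then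
          (acc.1 ++ [((PySem.Dict.mk item).get? "text").getD ""],
           acc.2 ++ [((PySem.Dict.mk item).get? "intent").getD ""])
        else acc) (X, y)
      = (X ++ (pvF td).1, y ++ (pvF td).2) := by
  induction td with
  | nil => intro X y; simp [pvF, pvPairs]
  | cons item rest ih =>
    intro X y
    rw [List.foldl_cons]
    simp only [pvF, pvPairs, List.filterMap_cons] at ih ⊢
    rw [contains_eq_isSome item "text", contains_eq_isSome item "intent"]
    rcases ht : (PySem.Dict.mk item).get? "text" with _ | t <;>
      rcases hi : (PySem.Dict.mk item).get? "intent" with _ | i <;>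
        (simp only [PySem.Dict.contains] at ih; simp [ht, hi, ih, List.append_assoc])

-- ===== VERDICT (by name: the statement is the Claim_ definition above) =====
theorem prepare_training_data_py_spec : Claim_equal_prepare_training_data_py := by
  intro td _
  unfold Spec_prepare_training_data_py prepare_training_data_py
  rw [alt_eq_pvF]
  simpa using foldl_prepA td [] []
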